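-- pv_equiv track=rewrite | github.com/bryanraimondi/SavageEngineer | ecs_pdf_highlighter.py | build_prefixes_and_firstchars
-- ===== SOURCE A (Python) =====
-- def build_prefixes_and_firstchars(cmp_keys_nosep):
--     prefixes = set()
--     first_chars = set()
--     for key in cmp_keys_nosep:
--         if not key:
--             continue
--         first_chars.add(key[0])
--         for i in range(1, len(key) + 1):
--             prefixes.add(key[:i])
--     return prefixes, first_chars
-- ===== SOURCE B (Python) =====
-- def build_prefixes_and_firstchars(cmp_keys_nosep):
--     prefixes = set()
--     for key in cmp_keys_nosep:
--         for i in range(1, len(key) + 1):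
--             prefixes.add(key[:i])
--     first_chars = {p for p in prefixes if len(p) == 1}
--     return prefixes, first_chars
-- ===== Notes on version B (the rewrite author's own statement) =====
-- stated objective: simpler
-- what changed: B builds only the prefix set in the loop (no emptiness guard, no parallel first_chars bookkeeping) and derives first_chars afterwards as the length-1 members of the prefix set.
import Mathlib
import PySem

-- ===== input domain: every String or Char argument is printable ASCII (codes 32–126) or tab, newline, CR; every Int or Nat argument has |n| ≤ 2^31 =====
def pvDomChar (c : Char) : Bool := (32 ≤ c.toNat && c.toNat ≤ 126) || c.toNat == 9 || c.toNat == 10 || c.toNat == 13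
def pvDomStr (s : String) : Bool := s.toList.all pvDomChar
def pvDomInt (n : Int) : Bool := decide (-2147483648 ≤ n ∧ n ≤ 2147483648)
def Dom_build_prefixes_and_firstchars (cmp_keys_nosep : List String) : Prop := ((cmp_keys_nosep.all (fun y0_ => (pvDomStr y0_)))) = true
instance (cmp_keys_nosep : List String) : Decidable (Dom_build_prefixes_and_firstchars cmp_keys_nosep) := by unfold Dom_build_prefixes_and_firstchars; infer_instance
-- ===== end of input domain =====

-- B derives first_chars from the prefix set after the loop instead of maintaining it alongside;
-- return value only (neither version mutates its argument).

-- shared inner loop: "for i in range(1, len(key) + 1): prefixes.add(key[:i])" (identical in both Pythons)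
def bpfInner (key : String) (p : PySem.Set String) : PySem.Set String :=
  (PySem.List.pyRange 1 (PySem.Str.len key + 1) 1).foldl
    (fun p i => PySem.Set.add p (PySem.Str.slice key none (some i))) p

-- ===== PORT A =====
def bpfStep (st : PySem.Set String × PySem.Set String) (key : String) :
    PySem.Set String × PySem.Set String :=
  if key = "" then st   -- "if not key: continue"
  else
    let fc := match PySem.Str.pyGet? key 0 with   -- first_chars.add(key[0])
      | some c => PySem.Set.add st.2 (String.ofList [c])
      | none => st.2
    (bpfInner key st.1, fc)

def build_prefixes_and_firstchars (cmp_keys_nosep : List String) : List String × List String :=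
  cmp_keys_nosep.foldl bpfStep (PySem.Set.empty, PySem.Set.empty)

-- ===== PORT B =====
def build_prefixes_and_firstchars_alt (cmp_keys_nosep : List String) : List String × List String :=
  let prefixes := cmp_keys_nosep.foldl (fun p key => bpfInner key p) PySem.Set.empty
  let first_chars := PySem.Set.ofList (prefixes.filter (fun s => PySem.Str.len s == 1))
  (prefixes, first_chars)

-- ===== PRECONDITION & SPEC =====
def Spec_build_prefixes_and_firstchars (cmp_keys_nosep : List String) (out : List String × List String) : Prop := out = build_prefixes_and_firstchars_alt cmp_keys_nosep
instance (cmp_keys_nosep : List String) (out : List String × List String) : Decidable (Spec_build_prefixes_and_firstchars cmp_keys_nosep out) := by unfold Spec_build_prefixes_and_firstchars; infer_instance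

-- ===== CLAIM (what is proved, stated in full; the proofs are below) =====
def Claim_equal_build_prefixes_and_firstchars : Prop := ∀ (cmp_keys_nosep : List String), Dom_build_prefixes_and_firstchars cmp_keys_nosep → Spec_build_prefixes_and_firstchars cmp_keys_nosep (build_prefixes_and_firstchars cmp_keys_nosep)

-- ===== LEMMAS AND PROOFS =====

-- filtering commutes with Set.add
theorem pv_filter_add {α : Type} [BEq α] [LawfulBEq α] (q : α → Bool) (p : PySem.Set α) (x : α) :
    (PySem.Set.add p x).filter q =
      if q x then PySem.Set.add (List.filter q p) x else List.filter q p := by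
  simp only [PySem.Set.add, PySem.Set.contains]
  by_cases hx : x ∈ p
  · rw [if_pos (by simpa using hx)]
    by_cases hq : q x
    · rw [if_pos hq, if_pos (by simpa using List.mem_filter.mpr ⟨hx, hq⟩)]
    · rw [if_neg (by simp [hq])]
  · rw [if_neg (by simpa using hx), List.filter_append]
    by_cases hq : q x
    · rw [if_pos hq, if_neg (by simp; intro h; exact absurd h hx)]
      simp [hq]
    · rw [if_neg (by simp [hq])]
      simp [hq]

-- a fold of adds whose new elements all fail q leaves the filter unchanged
theorem pv_filter_fold_false (q : String → Bool) (g : Int → String) (r : List Int)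
    (p : PySem.Set String) (h : ∀ i ∈ r, q (g i) = false) :
    (r.foldl (fun p i => PySem.Set.add p (g i)) p).filter q = p.filter q := by
  induction r generalizing p with
  | nil => rfl
  | cons i r ih =>
      simp only [List.foldl_cons]
      rw [ih _ (fun j hj => h j (List.mem_cons_of_mem _ hj)), pv_filter_add,
        h i (List.mem_cons_self), if_neg (by simp)]

-- a fold of adds preserves Nodup
theorem pv_nodup_fold_add (g : Int → String) (r : List Int) (p : PySem.Set String)
    (hp : p.Nodup) : (r.foldl (fun p i => PySem.Set.add p (g i)) p).Nodup := by
  induction r generalizing p with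
  | nil => exact hp
  | cons i r ih => exact ih _ (PySem.Set.nodup_add _ _ hp)

theorem pv_inner_empty (p : PySem.Set String) : bpfInner "" p = p := by
  unfold bpfInner
  rw [show PySem.Str.len "" + 1 = 1 from rfl, PySem.List.pyRange_one_eq_nil le_rfl]
  rfl

theorem pv_nodup_inner (key : String) (p : PySem.Set String) (hp : p.Nodup) :
    (bpfInner key p).Nodup :=
  pv_nodup_fold_add _ _ p hp

theorem pv_slice_one (key : String) (c : Char) (cs : List Char) (hk : key.toList = c :: cs) :
    PySem.Str.slice key none (some 1) = String.ofList [c] := by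
  apply String.toList_inj.mp
  rw [PySem.Str.toList_slice, PySem.Chars.slice_eq_listSlice,
    PySem.List.slice_to _ (by norm_num : (0:Int) ≤ 1), hk, String.toList_ofList]
  rfl

theorem pv_len_slice (key : String) (i : Int) (h0 : 0 ≤ i) :
    PySem.Str.len (PySem.Str.slice key none (some i)) = (min i.toNat key.toList.length : Int) := by
  rw [PySem.Str.len, PySem.Str.toList_slice, PySem.Chars.slice_eq_listSlice,
    PySem.List.slice_to _ h0, List.length_take]
  push_cast
  rfl

-- filtering the inner fold for a nonempty key: exactly the 1-prefix is length-1
theorem pv_filter_inner (key : String) (c : Char) (cs : List Char) (hk : key.toList = c :: cs)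
    (p : PySem.Set String) :
    (bpfInner key p).filter (fun s => PySem.Str.len s == 1) =
      PySem.Set.add (p.filter (fun s => PySem.Str.len s == 1)) (String.ofList [c]) := by
  have hn : 1 ≤ key.toList.length := by
    rw [hk]; simp only [List.length_cons]; omega
  have hlenk : PySem.Str.len key = (key.toList.length : Int) := rfl
  have hcons : PySem.List.pyRange 1 (PySem.Str.len key + 1) 1 =
      1 :: PySem.List.pyRange 2 (PySem.Str.len key + 1) 1 := by
    have := PySem.List.pyRange_one_cons (a := 1) (b := PySem.Str.len key + 1)
      (by rw [hlenk]; omega)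
    simpa using this
  rw [bpfInner, hcons, List.foldl_cons,
    pv_filter_fold_false _ _ _ _ (by
      intro i hi
      have hmem := (PySem.List.mem_pyRange_one).mp hi
      have hlen : PySem.Str.len (PySem.Str.slice key none (some i)) =
          (min i.toNat key.toList.length : Int) := pv_len_slice key i (by omega)
      simp only [beq_eq_false_iff_ne, ne_eq, hlen]
      rw [hlenk] at hmem
      omega),
    pv_filter_add, pv_slice_one key c cs hk,
    if_pos (by simp only [PySem.Str.len, String.toList_ofList, List.length_cons,
      List.length_nil]; rfl)]

theorem pv_pyGet_zero (key : String) (c : Char) (cs : List Char) (hk : key.toList = c :: cs) :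
    PySem.Str.pyGet? key 0 = some c := by
  rw [show (0 : Int) = ((0 : Nat) : Int) from rfl, PySem.Str.pyGet?_natCast, hk]
  rfl

-- main loop invariant: A's pair is (B's prefix set, its length-1 filter), and it stays Nodup
theorem pv_loop (l : List String) (p f : PySem.Set String) (hn : p.Nodup)
    (hf : f = p.filter (fun s => PySem.Str.len s == 1)) :
    l.foldl bpfStep (p, f) =
      (l.foldl (fun p key => bpfInner key p) p,
       (l.foldl (fun p key => bpfInner key p) p).filter (fun s => PySem.Str.len s == 1)) ∧
    (l.foldl (fun p key => bpfInner key p) p).Nodup := by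
  induction l generalizing p f with
  | nil => exact ⟨by simp [hf], hn⟩
  | cons key l ih =>
      simp only [List.foldl_cons]
      by_cases hk : key = ""
      · subst hk
        rw [bpfStep, if_pos rfl, pv_inner_empty]
        exact ih p f hn hf
      · obtain ⟨c, cs, hck⟩ : ∃ c cs, key.toList = c :: cs := by
          cases hcl : key.toList with
          | nil => exact absurd (String.toList_inj.mp (by simp [hcl])) hk
          | cons c cs => exact ⟨c, cs, rfl⟩
        have hstep : bpfStep (p, f) key =
            (bpfInner key p, PySem.Set.add f (String.ofList [c])) := by
          simp only [bpfStep, if_neg hk, pv_pyGet_zero key c cs hck]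
        rw [hstep]
        exact ih (bpfInner key p) _ (pv_nodup_inner key p hn)
          (by rw [hf, pv_filter_inner key c cs hck])

-- ===== VERDICT (by name: the statement is the Claim_ definition above) =====
theorem build_prefixes_and_firstchars_spec : Claim_equal_build_prefixes_and_firstchars := by
  intro l _
  unfold Spec_build_prefixes_and_firstchars build_prefixes_and_firstchars build_prefixes_and_firstchars_alt
  obtain ⟨heq, hnd⟩ := pv_loop l PySem.Set.empty PySem.Set.empty (by simp [PySem.Set.empty]) rfl
  show List.foldl bpfStep (PySem.Set.empty, PySem.Set.empty) l =
    (List.foldl (fun p key => bpfInner key p) PySem.Set.empty l,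
     PySem.Set.ofList (List.filter (fun s => PySem.Str.len s == 1)
       (List.foldl (fun p key => bpfInner key p) PySem.Set.empty l)))
  rw [heq, PySem.Set.ofList_eq_self_of_nodup _ (hnd.filter _)]
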